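-- pv_equiv track=rewrite | github.com/suima0713/ahf-docs | ahf/_scripts/ahf_failsafe_engine_v072.py | _check_v_overlay_keys
-- ===== SOURCE A (Python) =====
-- from typing import Dict, List, Any, Tuple, Optional
--
-- def _check_v_overlay_keys(confirmed_items: List[Dict[str, Any]]) -> List[str]:
--     """③V-Overlayのキーチェック"""
--     missing = []
--
--     # EV/S
--     has_ev_sales = any("ev_sales" in item["kpi"].lower() or "ev/sales" in item["kpi"].lower()
--                       for item in confirmed_items)
--     if not has_ev_sales:
--         missing.append("EV/S(Fwd)")
--
--     # Ro40
--     has_ro40 = any("rule_of_40" in item["kpi"].lower() or "ro40" in item["kpi"].lower()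
--                   for item in confirmed_items)
--     if not has_ro40:
--         missing.append("Ro40")
--
--     return missing
-- ===== SOURCE B (Python) =====
-- REQUIRED = (("EV/S(Fwd)", ("ev_sales", "ev/sales")), ("Ro40", ("rule_of_40", "ro40")))
--
-- def _check_v_overlay_keys(confirmed_items):
--     """Table-driven: search one newline-joined blob of all lowered KPI names.
--
--     Correct because no pattern contains a newline, so a pattern occurs in the
--     blob iff it occurs in some individual KPI string."""
--     blob = "\n".join(item["kpi"].lower() for item in confirmed_items)
--     return [label for label, pats in REQUIRED if not any(p in blob for p in pats)]
-- ===== Notes on version B (the rewrite author's own statement) =====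
-- stated objective: alternative
-- what changed: A runs two independent short-circuiting any() scans over the items with hard-coded substring tests; B instead concatenates all lowered KPI names into one newline-separated blob and filters a declarative table of (label, patterns) by substring search on that single text, which is correct since no pattern contains a newline.
import Mathlib
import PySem

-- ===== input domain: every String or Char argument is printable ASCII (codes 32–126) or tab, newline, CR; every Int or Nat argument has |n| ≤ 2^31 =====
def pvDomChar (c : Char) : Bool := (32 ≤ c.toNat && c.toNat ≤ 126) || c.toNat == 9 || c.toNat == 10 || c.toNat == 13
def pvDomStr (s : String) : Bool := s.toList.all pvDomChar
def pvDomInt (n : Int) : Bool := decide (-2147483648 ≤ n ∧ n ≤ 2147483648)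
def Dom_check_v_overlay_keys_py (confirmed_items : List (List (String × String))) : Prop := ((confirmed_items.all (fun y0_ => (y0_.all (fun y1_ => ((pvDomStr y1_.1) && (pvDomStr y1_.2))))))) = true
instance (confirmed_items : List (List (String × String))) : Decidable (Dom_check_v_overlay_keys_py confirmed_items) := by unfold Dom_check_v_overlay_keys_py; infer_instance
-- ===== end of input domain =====

-- B replaces A's two independent any() scans by a table-driven substring search over one newline-joined blob of the lowered KPI names (alternative algorithm, same cost); correct because no pattern contains a newline.


-- ===== PORT A =====
-- item["kpi"].lower(); Pre_ guarantees the key is present, so getD's default is never taken inside Pre_.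
def pvKpiLower (item : List (String × String)) : String :=
  PySem.Str.lower ((PySem.Dict.mk item).getD "kpi" "")

def pvHasEv (item : List (String × String)) : Bool :=
  PySem.Str.isIn "ev_sales" (pvKpiLower item) || PySem.Str.isIn "ev/sales" (pvKpiLower item)

def pvHasRo (item : List (String × String)) : Bool :=
  PySem.Str.isIn "rule_of_40" (pvKpiLower item) || PySem.Str.isIn "ro40" (pvKpiLower item)

def check_v_overlay_keys_py (confirmed_items : List (List (String × String))) : List String :=
  let missing : List String := []
  let has_ev_sales := confirmed_items.any (fun item => pvHasEv item)
  let missing := if !has_ev_sales then missing ++ ["EV/S(Fwd)"] else missing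
  let has_ro40 := confirmed_items.any (fun item => pvHasRo item)
  let missing := if !has_ro40 then missing ++ ["Ro40"] else missing
  missing

-- ===== PORT B =====
-- table of (label, patterns), then one "\n".join(...) blob searched per pattern
def pvRequired : List (String × List String) :=
  [("EV/S(Fwd)", ["ev_sales", "ev/sales"]), ("Ro40", ["rule_of_40", "ro40"])]

def check_v_overlay_keys_py_alt (confirmed_items : List (List (String × String))) : List String :=
  let blob := PySem.Str.join "\n" (confirmed_items.map (fun item => pvKpiLower item))
  (pvRequired.filter (fun lp => !(lp.2.any (fun p => PySem.Str.isIn p blob)))).map Prod.fst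

-- ===== PRECONDITION & SPEC =====
-- A raises KeyError on an item without a "kpi" key; Pre_ excludes exactly those inputs.
def Pre_check_v_overlay_keys_py (confirmed_items : List (List (String × String))) : Prop :=
  (confirmed_items.all (fun item => (PySem.Dict.mk item).contains "kpi")) = true
instance (confirmed_items : List (List (String × String))) : Decidable (Pre_check_v_overlay_keys_py confirmed_items) := by unfold Pre_check_v_overlay_keys_py; infer_instance

def pvWitness_check_v_overlay_keys_py : (List (List (String × String))) := [[("kpi", "EV_Sales fwd")]]

def Spec_check_v_overlay_keys_py (confirmed_items : List (List (String × String))) (out : List String) : Prop := out = check_v_overlay_keys_py_alt confirmed_items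
instance (confirmed_items : List (List (String × String))) (out : List String) : Decidable (Spec_check_v_overlay_keys_py confirmed_items out) := by unfold Spec_check_v_overlay_keys_py; infer_instance

-- ===== CLAIM (what is proved, stated in full; the proofs are below) =====
def Claim_equal_check_v_overlay_keys_py : Prop := ∀ (confirmed_items : List (List (String × String))), Dom_check_v_overlay_keys_py confirmed_items → Pre_check_v_overlay_keys_py confirmed_items → Spec_check_v_overlay_keys_py confirmed_items (check_v_overlay_keys_py confirmed_items)

-- ===== LEMMAS AND PROOFS =====
-- a pattern not containing c is an infix of a ++ c :: b iff it is an infix of a or of b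
theorem pv_infix_split {p a b : List Char} {c : Char} (hc : c ∉ p) :
    p <:+: a ++ c :: b ↔ p <:+: a ∨ p <:+: b := by
  constructor
  · rintro ⟨s, t, h⟩
    rw [List.append_assoc] at h
    by_cases h1 : s.length + p.length ≤ a.length
    · left
      have ha : a = List.take a.length (s ++ (p ++ t)) := by
        rw [h]; simp
      rw [List.take_append, List.take_append] at ha
      rw [List.take_of_length_le (by omega), List.take_of_length_le (by omega)] at ha
      exact ⟨s, List.take (a.length - s.length - p.length) t,
        by rw [List.append_assoc]; exact ha.symm⟩
    · by_cases h2 : a.length < s.length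
      · right
        have hb : b = List.drop (a.length + 1) (s ++ (p ++ t)) := by
          rw [h]; simp [List.drop_append]
        rw [List.drop_append] at hb
        rw [show a.length + 1 - s.length = 0 from by omega, List.drop_zero] at hb
        exact ⟨List.drop (a.length + 1) s, t, by rw [List.append_assoc]; exact hb.symm⟩
      · exfalso
        have hq : (s ++ (p ++ t))[a.length]? = some c := by
          rw [h, List.getElem?_append_right (by omega)]
          simp
        rw [← List.append_assoc,
          List.getElem?_append_left (by simp; omega),
          List.getElem?_append_right (by omega)] at hq
        exact hc (List.mem_of_getElem? hq)
  · rintro (h | h)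
    · exact h.trans (List.prefix_append a (c :: b)).isInfix
    · exact h.trans ((List.suffix_cons c b).trans (List.suffix_append a (c :: b))).isInfix

-- a newline-free nonempty pattern occurs in the newline-joined list iff it occurs in some element
theorem pv_infix_join (p : List Char) (hp : p ≠ []) (hc : ('\n' : Char) ∉ p) :
    ∀ ks : List (List Char), (p <:+: PySem.Chars.join ['\n'] ks ↔ ∃ k ∈ ks, p <:+: k)
  | [] => by simp [PySem.Chars.join_nil, List.infix_nil, hp]
  | [k] => by simp [PySem.Chars.join_singleton]
  | k :: k' :: ks => by
      rw [PySem.Chars.join_cons_cons,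
        show k ++ ['\n'] ++ PySem.Chars.join ['\n'] (k' :: ks)
            = k ++ '\n' :: PySem.Chars.join ['\n'] (k' :: ks) from by simp,
        pv_infix_split hc, pv_infix_join p hp hc (k' :: ks)]
      simp

-- searching the blob equals scanning the items, per pattern
theorem pv_any_isIn_eq (p : String) (hp : p.toList ≠ []) (hc : ('\n' : Char) ∉ p.toList)
    (items : List (List (String × String))) :
    items.any (fun item => PySem.Str.isIn p (pvKpiLower item))
      = PySem.Str.isIn p (PySem.Str.join "\n" (items.map (fun item => pvKpiLower item))) := by
  rw [Bool.eq_iff_iff]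
  simp only [List.any_eq_true, PySem.Str.isIn_iff_infix, PySem.Str.toList_join, List.map_map,
    show ("\n" : String).toList = ['\n'] from rfl]
  rw [pv_infix_join p.toList hp hc]
  simp

-- any of an OR is the OR of the anys
theorem pv_any_or {α : Type} (l : List α) (f g : α → Bool) :
    l.any (fun x => f x || g x) = (l.any f || l.any g) := by
  induction l with
  | nil => simp
  | cons a l ih =>
      simp only [List.any_cons, ih]
      cases f a <;> cases g a <;> simp

-- ===== VERDICT (by name: the statement is the Claim_ definition above) =====
theorem check_v_overlay_keys_py_spec : Claim_equal_check_v_overlay_keys_py := by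
  intro confirmed_items _ _
  unfold Spec_check_v_overlay_keys_py check_v_overlay_keys_py check_v_overlay_keys_py_alt
    pvRequired
  simp only [List.filter_cons, List.filter_nil, List.any_cons, List.any_nil, Bool.or_false]
  simp only [pvHasEv, pvHasRo, pv_any_or,
    pv_any_isIn_eq "ev_sales" (by decide) (by decide),
    pv_any_isIn_eq "ev/sales" (by decide) (by decide),
    pv_any_isIn_eq "rule_of_40" (by decide) (by decide),
    pv_any_isIn_eq "ro40" (by decide) (by decide)]
  generalize PySem.Str.isIn "ev_sales" (PySem.Str.join "\n" (confirmed_items.map (fun item => pvKpiLower item))) = e1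
  generalize PySem.Str.isIn "ev/sales" (PySem.Str.join "\n" (confirmed_items.map (fun item => pvKpiLower item))) = e2
  generalize PySem.Str.isIn "rule_of_40" (PySem.Str.join "\n" (confirmed_items.map (fun item => pvKpiLower item))) = e3
  generalize PySem.Str.isIn "ro40" (PySem.Str.join "\n" (confirmed_items.map (fun item => pvKpiLower item))) = e4
  cases e1 <;> cases e2 <;> cases e3 <;> cases e4 <;> simp
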